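-- pv_equiv track=rewrite | github.com/nehcuh/CherryQuant | scripts/refactor_imports.py | transform_import_token
-- ===== SOURCE A (Python) =====
-- from typing import Dict, Iterable, List, Set, Tuple
--
-- PREFIX_MAP: Dict[str, str] = {
--     "ai": "cherryquant.ai",
--     "adapters": "cherryquant.adapters",
--     "services": "cherryquant.services",
--     "web": "cherryquant.web",
-- }
--
-- def transform_import_token(token: str) -> str:
--     """
--     将单个 import token 替换前缀，例如：
--       - ai                    -> cherryquant.ai
--       - ai as A               -> cherryquant.ai as A
--       - ai.decision_engine    -> cherryquant.ai.decision_engine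
--       - adapters.data_adapter -> cherryquant.adapters.data_adapter
--       - services as svc       -> cherryquant.services as svc
--     """
--     original = token
--     ts = token.lstrip()
--     leading = token[: len(token) - len(ts)]  # 保留前导空白
--     # 处理 "name as alias"
--     # 格式可能是：   ai as alias
--     # 或者：         adapters.data_storage as ds
--     # 直接找到首个空格之前的模块前缀，再做替换
--     head = ts
--     rest = ""
--     if " " in ts:
--         space_idx = ts.find(" ")
--         head, rest = ts[:space_idx], ts[space_idx:]  # head: 模块部分；rest: " as alias"
--     # 匹配前缀表
--     for old, new in PREFIX_MAP.items():
--         if head == old: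
--             head = new
--             break
--         if head.startswith(old + "."):
--             head = new + head[len(old) :]
--             break
--     new_token = leading + head + rest
--     if new_token != original:
--         return new_token
--     return token
-- ===== SOURCE B (Python) =====
-- # B: no mapping table at all — scan once for the first dotted segment of the
-- # module head; if it names one of the migrated top-level packages, insert the
-- # constant "cherryquant." prefix right after the leading whitespace.
-- _PACKAGES = frozenset({"ai", "adapters", "services", "web"})
--
-- def transform_import_token(token: str) -> str:
--     i = 0
--     while i < len(token) and token[i].isspace():
--         i += 1
--     j = i
--     while j < len(token) and token[j] not in " .":
--         j += 1
--     if token[i:j] in _PACKAGES: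
--         return token[:i] + "cherryquant." + token[i:]
--     return token
-- ===== Notes on version B (the rewrite author's own statement) =====
-- stated objective: simpler
-- what changed: B drops the prefix mapping entirely: observing that every map value is the constant package prefix followed by its own key, B scans the token once to find the first segment (up to a space or dot) after the leading whitespace, tests membership in a set of the four package names, and on a hit inserts the constant prefix at that position, never splitting head/rest or rebuilding the token from map values.
import Mathlib
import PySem

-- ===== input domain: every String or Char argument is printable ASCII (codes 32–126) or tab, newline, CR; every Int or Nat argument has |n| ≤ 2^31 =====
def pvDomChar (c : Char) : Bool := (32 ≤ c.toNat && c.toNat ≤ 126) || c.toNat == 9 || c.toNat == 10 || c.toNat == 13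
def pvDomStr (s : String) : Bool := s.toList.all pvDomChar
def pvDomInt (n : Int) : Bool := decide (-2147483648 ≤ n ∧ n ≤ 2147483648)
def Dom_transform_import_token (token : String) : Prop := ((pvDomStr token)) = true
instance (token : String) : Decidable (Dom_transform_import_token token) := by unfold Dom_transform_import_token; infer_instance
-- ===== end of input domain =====

-- B drops the prefix map entirely: every map value is the constant package prefix plus its own
-- key, so B scans the token once for the first segment (up to space or dot) after the leading
-- whitespace and, on a package-set hit, inserts that constant prefix there; objective: simpler.

-- ===== PORT A =====
-- PREFIX_MAP, in insertion order (shared module constant)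
def pvPrefixMap : List (List Char × List Char) :=
  [("ai".toList, "cherryquant.ai".toList),
   ("adapters".toList, "cherryquant.adapters".toList),
   ("services".toList, "cherryquant.services".toList),
   ("web".toList, "cherryquant.web".toList)]

-- A's 'for old, new in PREFIX_MAP.items(): … break'
def pvMatchPrefix (head : List Char) : List (List Char × List Char) → List Char
  | [] => head
  | (old, nw) :: restMap =>
      if head = old then nw
      else if PySem.Chars.startswith head (old ++ ['.']) then nw ++ head.drop old.length
      else pvMatchPrefix head restMap

def transform_import_token (token : String) : String :=
  let tl := token.toList
  let ts := PySem.Chars.lstrip tl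
  let leading := tl.take (tl.length - ts.length)   -- token[: len(token) - len(ts)]
  let hr : List Char × List Char :=
    if PySem.Chars.isIn [' '] ts then
      let i := PySem.Chars.find ts [' ']
      (PySem.List.slice ts none (some i), PySem.List.slice ts (some i) none)
    else (ts, [])
  let head := pvMatchPrefix hr.1 pvPrefixMap
  let newToken := leading ++ head ++ hr.2
  if newToken ≠ tl then String.ofList newToken else token

-- ===== PORT B =====
-- _PACKAGES = frozenset({"ai", "adapters", "services", "web"})
def pvPackages : PySem.Set (List Char) :=
  PySem.Set.ofList ["ai".toList, "adapters".toList, "services".toList, "web".toList]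

-- 'while i < len(token) and token[i].isspace(): i += 1' — number of leading whitespace chars
def pvSkipWs : List Char → Nat
  | [] => 0
  | c :: t => if PySem.Chars.isspace c then pvSkipWs t + 1 else 0

def transform_import_token_alt (token : String) : String :=
  let tl := token.toList
  let i := pvSkipWs tl
  -- 'while j < len(token) and token[j] not in " .": j += 1'; seg = token[i:j]
  let seg := (tl.drop i).takeWhile (fun c => c ≠ ' ' && c ≠ '.')
  if PySem.Set.contains pvPackages seg then
    String.ofList (tl.take i ++ "cherryquant.".toList ++ tl.drop i)
  else token

-- ===== PRECONDITION & SPEC =====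
def Spec_transform_import_token (token : String) (out : String) : Prop := out = transform_import_token_alt token
instance (token : String) (out : String) : Decidable (Spec_transform_import_token token out) := by unfold Spec_transform_import_token; infer_instance

-- ===== CLAIM =====
def Claim_equal_transform_import_token : Prop := ∀ (token : String), Dom_transform_import_token token → Spec_transform_import_token token (transform_import_token token)

-- ===== LEMMAS AND PROOFS =====

theorem pv_find_go_singleton (c : Char) : ∀ (s : List Char) (k : Nat),
    PySem.Chars.find.go [c] s k =
      if c ∈ s then ((k : Int) + (s.takeWhile (· ≠ c)).length) else -1 := by
  intro s
  induction s with
  | nil => intro k; simp [PySem.Chars.find.go]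
  | cons h t ih =>
      intro k
      by_cases hc : h = c
      · subst hc
        simp [PySem.Chars.find.go, List.isPrefixOf, List.takeWhile]
      · have : ¬ ([c].isPrefixOf (h :: t) = true) := by
          simp [List.isPrefixOf]; exact fun e => absurd e.symm hc
        simp [PySem.Chars.find.go, this, ih (k + 1), List.takeWhile, hc, Ne.symm hc]
        split_ifs with hm
        · ring
        · rfl

theorem pv_find_singleton (c : Char) (s : List Char) :
    PySem.Chars.find s [c] =
      if c ∈ s then ((s.takeWhile (· ≠ c)).length : Int) else -1 := by
  simpa using pv_find_go_singleton c s 0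

-- dot-free key: A's two branch tests together say exactly 'first dotted segment = old'
theorem pv_key_iff (head old : List Char) (hold : '.' ∉ old) :
    (head = old ∨ (old ++ ['.']) <+: head) ↔ head.takeWhile (· ≠ '.') = old := by
  have htw : old.takeWhile (· ≠ '.') = old :=
    List.takeWhile_eq_self_iff.mpr (fun a ha => by
      simp; exact fun e => hold (e ▸ ha))
  constructor
  · rintro (rfl | ⟨t, rfl⟩)
    · exact htw
    · rw [List.append_assoc, List.takeWhile_append, htw]
      simp
  · intro hseg
    have hsplit := List.takeWhile_append_dropWhile (p := (· ≠ '.')) (l := head)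
    rw [hseg] at hsplit
    cases hd : head.dropWhile (· ≠ '.') with
    | nil => left; rw [← hsplit, hd, List.append_nil]
    | cons d t =>
        right
        have hne : head.dropWhile (· ≠ '.') ≠ [] := by rw [hd]; simp
        have hdfalse := List.head_dropWhile_not (· ≠ '.') hne
        have hdot : d = '.' := by
          simp only [hd, List.head_cons] at hdfalse
          simpa using hdfalse
        exact ⟨t, by rw [← hsplit, hd, hdot]; simp⟩

-- A's scan over a map whose every value is C ++ its dot-free key: the loop either inserts C in
-- front of head (its first dotted segment is one of the keys) or leaves head unchanged
theorem pv_loop_const (C head : List Char) :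
    ∀ (m : List (List Char × List Char)), (∀ p ∈ m, '.' ∉ p.1 ∧ p.2 = C ++ p.1) →
    pvMatchPrefix head m =
      (if head.takeWhile (· ≠ '.') ∈ m.map Prod.fst then C ++ head else head) := by
  intro m
  induction m with
  | nil => intro _; simp [pvMatchPrefix]
  | cons p m ih =>
      intro hkeys
      obtain ⟨old, nw⟩ := p
      obtain ⟨hold, hval⟩ := hkeys (old, nw) (by simp)
      by_cases hk : head.takeWhile (· ≠ '.') = old
      · have hmem : head.takeWhile (· ≠ '.') ∈ List.map Prod.fst ((old, nw) :: m) := by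
          rw [List.map_cons, List.mem_cons]; exact Or.inl hk
        rw [if_pos hmem]
        rcases (pv_key_iff head old hold).mpr hk with rfl | ⟨t, rfl⟩
        · simp only [pvMatchPrefix, if_true]
          exact hval

        · have hne : old ++ ['.'] ++ t ≠ old := by
            intro h
            have := congrArg List.length h
            simp at this
          have hpre : PySem.Chars.startswith (old ++ ['.'] ++ t) (old ++ ['.']) = true := by
            simp [PySem.Chars.startswith, List.isPrefixOf_iff_prefix]
          simp only [pvMatchPrefix]
          rw [if_neg hne, if_pos hpre, show nw = C ++ old from hval]
          rw [List.append_assoc old ['.'] t, List.drop_left]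
          simp [List.append_assoc]
      · have h1 : ¬ head = old := fun h =>
          hk ((pv_key_iff head old hold).mp (Or.inl h))
        have h2 : ¬ (PySem.Chars.startswith head (old ++ ['.']) = true) := by
          intro h
          exact hk ((pv_key_iff head old hold).mp (Or.inr (by
            simpa [PySem.Chars.startswith, List.isPrefixOf_iff_prefix] using h)))
        have hmem : (head.takeWhile (· ≠ '.') ∈ List.map Prod.fst ((old, nw) :: m))
            ↔ (head.takeWhile (· ≠ '.') ∈ List.map Prod.fst m) := by
          rw [List.map_cons, List.mem_cons]
          exact or_iff_right hk
        simp only [pvMatchPrefix]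
        rw [if_neg h1, if_neg h2, ih (fun q hq => hkeys q (by simp [hq]))]
        simp only [hmem]

theorem pvSkipWs_eq (l : List Char) :
    pvSkipWs l = (l.takeWhile PySem.Chars.isspace).length := by
  induction l with
  | nil => rfl
  | cons c t ih =>
      by_cases h : PySem.Chars.isspace c
      · simp [pvSkipWs, h, List.takeWhile, ih]
      · simp [pvSkipWs, h, List.takeWhile]

theorem pv_takeWhile_and (p q : Char → Bool) (l : List Char) :
    (l.takeWhile p).takeWhile q = l.takeWhile (fun c => p c && q c) := by
  induction l with
  | nil => rfl
  | cons c t ih =>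
      by_cases hp : p c
      · by_cases hq : q c <;> simp [List.takeWhile, hp, hq, ih]
      · simp [List.takeWhile, hp]

theorem transform_import_token_spec : Claim_equal_transform_import_token := by
  intro token _
  unfold Spec_transform_import_token transform_import_token transform_import_token_alt
  simp only []
  set tl := token.toList with htl
  set ts := PySem.Chars.lstrip tl with hts
  set hd := ts.takeWhile (· ≠ ' ') with hhd
  set k := hd.length with hk
  -- the leading whitespace is the takeWhile-isspace prefix of tl
  have hlen : (tl.takeWhile PySem.Chars.isspace).length + ts.length = tl.length := by
    have h := congrArg List.length (List.takeWhile_append_dropWhile (p := PySem.Chars.isspace) (l := tl))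
    rw [List.length_append] at h
    rw [hts, PySem.Chars.lstrip]
    exact h
  have h2 : tl.takeWhile PySem.Chars.isspace ++ ts = tl := by
    rw [hts, PySem.Chars.lstrip]
    exact List.takeWhile_append_dropWhile
  have hi : pvSkipWs tl = tl.length - ts.length := by
    rw [pvSkipWs_eq]; omega
  have hlead : tl.take (tl.length - ts.length) = tl.takeWhile PySem.Chars.isspace := by
    have h1 : tl.length - ts.length = (tl.takeWhile PySem.Chars.isspace).length := by omega
    rw [h1]
    exact (List.prefix_iff_eq_take.mp (List.takeWhile_prefix _)).symm
  have hdrop : tl.drop (tl.length - ts.length) = ts := by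
    have e1 : tl.take (tl.length - ts.length) ++ tl.drop (tl.length - ts.length)
        = tl.take (tl.length - ts.length) ++ ts := by
      rw [List.take_append_drop, hlead]
      exact h2.symm
    exact List.append_cancel_left e1
  have hleadts : tl.take (tl.length - ts.length) ++ ts = tl := by
    rw [hlead]; exact h2
  -- A's head/rest split equals the takeWhile/drop split at the first space
  have htake : ts.take k = hd := (List.prefix_iff_eq_take.mp (List.takeWhile_prefix _)).symm
  have hsplitpair :
      (if PySem.Chars.isIn [' '] ts then
         ((PySem.List.slice ts none (some (PySem.Chars.find ts [' ']))),
          (PySem.List.slice ts (some (PySem.Chars.find ts [' '])) none))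
       else (ts, ([] : List Char))) = (hd, ts.drop k) := by
    by_cases hsp : ' ' ∈ ts
    · have hfind : PySem.Chars.find ts [' '] = (k : Int) := by
        rw [pv_find_singleton]; simp [hsp, hk, hhd]
      have hisIn : PySem.Chars.isIn [' '] ts = true := by
        simp [PySem.Chars.isIn, hfind]
      rw [if_pos hisIn, hfind, PySem.List.slice_to_natCast, PySem.List.slice_from_natCast, htake]
    · have hfind : PySem.Chars.find ts [' '] = -1 := by
        rw [pv_find_singleton]; simp [hsp]
      have hisIn : ¬ (PySem.Chars.isIn [' '] ts = true) := by
        simp [PySem.Chars.isIn, hfind]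
      have hall : ts.takeWhile (· ≠ ' ') = ts :=
        List.takeWhile_eq_self_iff.mpr (fun a ha => by
          simp; exact fun e => hsp (e ▸ ha))
      rw [if_neg hisIn]
      rw [hhd, hall, hk, hhd, hall, List.drop_length]
  rw [hsplitpair]
  simp only []
  -- A's loop over the concrete map
  rw [pv_loop_const "cherryquant.".toList hd pvPrefixMap (by decide)]
  -- B's segment equals the first dotted segment of A's head
  have hseg : (tl.drop (pvSkipWs tl)).takeWhile (fun c => c ≠ ' ' && c ≠ '.')
      = hd.takeWhile (· ≠ '.') := by
    rw [hi, hdrop, hhd, pv_takeWhile_and]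
  -- B's membership test equals the key-list membership of A's loop
  have hpack : pvPackages = pvPrefixMap.map Prod.fst := by decide
  have hhdrest : hd ++ ts.drop k = ts := by
    rw [← htake]; exact List.take_append_drop k ts
  by_cases hmem : hd.takeWhile (· ≠ '.') ∈ pvPrefixMap.map Prod.fst
  · rw [if_pos hmem]
    have hBmem : PySem.Set.contains pvPackages
        ((tl.drop (pvSkipWs tl)).takeWhile (fun c => c ≠ ' ' && c ≠ '.')) = true := by
      rw [hseg, PySem.Set.contains_iff, hpack]; exact hmem
    rw [if_pos hBmem]
    have hassoc : tl.take (tl.length - ts.length) ++ ("cherryquant.".toList ++ hd) ++ ts.drop k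
        = tl.take (tl.length - ts.length) ++ "cherryquant.".toList ++ ts := by
      calc tl.take (tl.length - ts.length) ++ ("cherryquant.".toList ++ hd) ++ ts.drop k
          = tl.take (tl.length - ts.length) ++ "cherryquant.".toList ++ (hd ++ ts.drop k) := by
            simp [List.append_assoc]
        _ = tl.take (tl.length - ts.length) ++ "cherryquant.".toList ++ ts := by rw [hhdrest]
    have hne : tl.take (tl.length - ts.length) ++ ("cherryquant.".toList ++ hd) ++ ts.drop k ≠ tl := by
      rw [hassoc]
      intro h
      have hl := congrArg List.length h
      simp only [List.length_append, List.length_take] at hl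
      simp at hl
      omega
    rw [if_pos hne, hassoc, hi, hdrop]
  · rw [if_neg hmem]
    have hBmem : ¬ (PySem.Set.contains pvPackages
        ((tl.drop (pvSkipWs tl)).takeWhile (fun c => c ≠ ' ' && c ≠ '.')) = true) := by
      rw [hseg, PySem.Set.contains_iff, hpack]; exact hmem
    rw [if_neg hBmem]
    have heq : tl.take (tl.length - ts.length) ++ hd ++ ts.drop k = tl := by
      rw [List.append_assoc, hhdrest, hleadts]
    rw [if_neg (by simp [heq])]
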